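-- pv_equiv track=rewrite | github.com/Arashi0881/fruit_box_script | fruit_box/main.py | find_rectangle_combinations
-- ===== SOURCE A (Python) =====
-- import itertools
--
-- def find_rectangle_combinations(numbers):
--     combinations = []
--
--     for (num1, coord1), (num2, coord2) in itertools.combinations(numbers, 2):
--         # if abs(coord1[0] - coord2[0]) > 200 or abs(coord1[1] - coord2[1]) > 200:
--         #     continue
--         top_left_x = min(coord1[0]-39, coord2[0]-39)
--         top_left_y = min(coord1[1]-39, coord2[1]-39)
--         bottom_right_x = max(coord1[0]+38, coord2[0]+38)
--         bottom_right_y = max(coord1[1]+38, coord2[1]+38)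
--
--         contained_numbers = [
--             (num, coord) for num, coord in numbers
--             if top_left_x <= coord[0] <= bottom_right_x and top_left_y <= coord[1] <= bottom_right_y
--         ]
--
--         total = sum(num for num, _ in contained_numbers)
--
--         if total == 10:
--             combinations.append(contained_numbers)
--
--     return combinations
-- ===== SOURCE B (Python) =====
-- def find_rectangle_combinations(numbers):
--     # Sort points by x once; each pair's box selects a contiguous x-window found by
--     # binary search, so only that window is scanned for the sum; the contained list
--     # is materialized (from the original list) only when the sum is 10.
--     srt = sorted(numbers, key=lambda p: p[1][0])
--     xs = [c[0] for _, c in srt]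
--
--     def bisect_left(t):
--         lo, hi = 0, len(xs)
--         while lo < hi:
--             mid = (lo + hi) // 2
--             if xs[mid] < t:
--                 lo = mid + 1
--             else:
--                 hi = mid
--         return lo
--
--     combinations = []
--     tail = numbers
--     while tail:
--         (num1, c1), tail = tail[0], tail[1:]
--         for num2, c2 in tail:
--             xlo = min(c1[0], c2[0]) - 39
--             xhi = max(c1[0], c2[0]) + 38
--             ylo = min(c1[1], c2[1]) - 39
--             yhi = max(c1[1], c2[1]) + 38
--             total = 0
--             for num, c in srt[bisect_left(xlo):bisect_left(xhi + 1)]: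
--                 if ylo <= c[1] <= yhi:
--                     total += num
--             if total == 10:
--                 combinations.append([
--                     (num, c) for num, c in numbers
--                     if xlo <= c[0] <= xhi and ylo <= c[1] <= yhi
--                 ])
--     return combinations
-- ===== Notes on version B (the rewrite author's own statement) =====
-- stated objective: faster
-- what changed: B sorts the points by x once and binary-searches each pair's x-window, summing only the points inside that window (and building the contained list only on a hit), instead of A's full scan of all points for every pair.
import Mathlib
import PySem

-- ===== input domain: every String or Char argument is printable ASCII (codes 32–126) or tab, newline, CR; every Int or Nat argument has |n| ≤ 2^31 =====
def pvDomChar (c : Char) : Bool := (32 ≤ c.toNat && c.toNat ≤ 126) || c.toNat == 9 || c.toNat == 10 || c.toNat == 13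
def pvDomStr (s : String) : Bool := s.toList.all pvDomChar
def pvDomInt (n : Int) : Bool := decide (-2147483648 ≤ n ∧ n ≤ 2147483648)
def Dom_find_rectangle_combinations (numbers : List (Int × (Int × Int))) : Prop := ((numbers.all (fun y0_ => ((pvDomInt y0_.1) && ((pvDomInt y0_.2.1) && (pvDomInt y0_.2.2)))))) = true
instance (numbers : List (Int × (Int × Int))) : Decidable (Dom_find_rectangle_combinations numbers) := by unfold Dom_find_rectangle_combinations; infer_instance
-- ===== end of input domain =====

-- B sorts the points by x once and binary-searches each pair's x-window, scanning only that
-- window for the sum (constant-factor speedup measured on the timing inputs); same return value.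

-- ===== PORT A =====
-- itertools.combinations(numbers, 2), in Python's order
def pvCombs2 {α : Type} : List α → List (α × α)
  | [] => []
  | x :: rest => rest.map (fun y => (x, y)) ++ pvCombs2 rest

-- the body of A's for-loop (appending to `combinations`), named for readability
def pvStepA (numbers : List (Int × (Int × Int))) (combinations : List (List (Int × (Int × Int))))
    (pr : (Int × (Int × Int)) × (Int × (Int × Int))) : List (List (Int × (Int × Int))) :=
  let coord1 := pr.1.2
  let coord2 := pr.2.2
  let top_left_x := min (coord1.1 - 39) (coord2.1 - 39)
  let top_left_y := min (coord1.2 - 39) (coord2.2 - 39)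
  let bottom_right_x := max (coord1.1 + 38) (coord2.1 + 38)
  let bottom_right_y := max (coord1.2 + 38) (coord2.2 + 38)
  let contained_numbers := numbers.filter (fun p =>
    decide (top_left_x ≤ p.2.1) && decide (p.2.1 ≤ bottom_right_x) &&
    decide (top_left_y ≤ p.2.2) && decide (p.2.2 ≤ bottom_right_y))
  let total := (contained_numbers.map (fun p => p.1)).sum
  if total == 10 then combinations ++ [contained_numbers] else combinations

def find_rectangle_combinations (numbers : List (Int × (Int × Int))) : List (List (Int × (Int × Int))) :=
  (pvCombs2 numbers).foldl (pvStepA numbers) []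

-- ===== PORT B =====
-- the body of B's inner for-loop; Source B's hand-written bisect_left (lo/hi/mid loop) is
-- literally PySem.List.bisectLeft's loop, ported as such
def pvStepB (numbers srt : List (Int × (Int × Int))) (xs : List Int)
    (p1 : Int × (Int × Int)) (combinations : List (List (Int × (Int × Int))))
    (p2 : Int × (Int × Int)) : List (List (Int × (Int × Int))) :=
  let xlo := min p1.2.1 p2.2.1 - 39
  let xhi := max p1.2.1 p2.2.1 + 38
  let ylo := min p1.2.2 p2.2.2 - 39
  let yhi := max p1.2.2 p2.2.2 + 38
  let total := (PySem.List.slice srt (some ((PySem.List.bisectLeft xs xlo : Nat) : Int))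
      (some ((PySem.List.bisectLeft xs (xhi + 1) : Nat) : Int))).foldl
    (fun t p => if decide (ylo ≤ p.2.2) && decide (p.2.2 ≤ yhi) then t + p.1 else t) 0
  if total == 10 then
    combinations ++ [numbers.filter (fun p =>
      decide (xlo ≤ p.2.1) && decide (p.2.1 ≤ xhi) &&
      decide (ylo ≤ p.2.2) && decide (p.2.2 ≤ yhi))]
  else combinations

-- B's while loop: pop the head, run the inner loop over the tail
def pvGoB (numbers srt : List (Int × (Int × Int))) (xs : List Int) :
    List (Int × (Int × Int)) → List (List (Int × (Int × Int))) → List (List (Int × (Int × Int)))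
  | [], combinations => combinations
  | p1 :: tail, combinations => pvGoB numbers srt xs tail (tail.foldl (pvStepB numbers srt xs p1) combinations)

def find_rectangle_combinations_alt (numbers : List (Int × (Int × Int))) : List (List (Int × (Int × Int))) :=
  let srt := PySem.List.sorted numbers (fun p => p.2.1) false
  let xs := srt.map (fun p => p.2.1)
  pvGoB numbers srt xs numbers []

-- ===== PRECONDITION & SPEC =====
def Spec_find_rectangle_combinations (numbers : List (Int × (Int × Int))) (out : List (List (Int × (Int × Int)))) : Prop := out = find_rectangle_combinations_alt numbers
instance (numbers : List (Int × (Int × Int))) (out : List (List (Int × (Int × Int)))) : Decidable (Spec_find_rectangle_combinations numbers out) := by unfold Spec_find_rectangle_combinations; infer_instance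

-- ===== CLAIM (what is proved, stated in full; the proofs are below) =====
def Claim_equal_find_rectangle_combinations : Prop := ∀ (numbers : List (Int × (Int × Int))), Dom_find_rectangle_combinations numbers → Spec_find_rectangle_combinations numbers (find_rectangle_combinations numbers)

-- ===== LEMMAS AND PROOFS =====

lemma pv_filter_interval_eq_drop_take {α : Type} (key : α → Int) (xlo xhi : Int) :
    ∀ (l : List α) (lo hi : Nat), lo ≤ hi → hi ≤ l.length →
    (∀ (j : Nat) (hj : j < l.length), j < lo → key l[j] < xlo) →
    (∀ (j : Nat) (hj : j < l.length), lo ≤ j → j < hi → xlo ≤ key l[j] ∧ key l[j] ≤ xhi) →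
    (∀ (j : Nat) (hj : j < l.length), hi ≤ j → xhi < key l[j]) →
    l.filter (fun p => decide (xlo ≤ key p) && decide (key p ≤ xhi)) = (l.drop lo).take (hi - lo) := by
  intro l
  induction l with
  | nil => intro lo hi _ _ _ _ _; simp
  | cons a t ih =>
    intro lo hi hlohi hhi hbelow hmid habove
    match lo, hi with
    | 0, 0 =>
      have hnil : List.filter (fun p => decide (xlo ≤ key p) && decide (key p ≤ xhi)) (a :: t) = [] := by
        rw [List.filter_eq_nil_iff]
        intro p hp
        obtain ⟨j, hj, rfl⟩ := List.mem_iff_getElem.mp hp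
        have := habove j hj (Nat.zero_le j)
        simp only [Bool.and_eq_true, decide_eq_true_eq, not_and]
        intro _; omega
      simp [hnil]
    | 0, h + 1 =>
      have hk := hmid 0 (by simp) (Nat.zero_le 0) (Nat.succ_pos h)
      simp only [List.getElem_cons_zero] at hk
      rw [List.filter_cons, if_pos (by simp [hk.1, hk.2])]
      rw [Nat.sub_zero, List.drop_zero, List.take_succ_cons]
      congr 1
      have := ih 0 h (Nat.zero_le h) (by simpa using hhi)
        (fun j hj hlt => absurd hlt (Nat.not_lt_zero j))
        (fun j hj _ hjh => by
          have := hmid (j+1) (by simpa using Nat.succ_lt_succ hj) (Nat.zero_le _) (Nat.succ_lt_succ hjh)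
          simpa using this)
        (fun j hj hge => by
          have := habove (j+1) (by simpa using Nat.succ_lt_succ hj) (Nat.succ_le_succ hge)
          simpa using this)
      simpa using this
    | l0 + 1, h + 1 =>
      have hk := hbelow 0 (by simp) (Nat.succ_pos l0)
      simp only [List.getElem_cons_zero] at hk
      rw [List.filter_cons, if_neg (by simp; intro h'; omega)]
      rw [List.drop_succ_cons]
      have := ih l0 h (Nat.le_of_succ_le_succ hlohi) (by simpa using hhi)
        (fun j hj hlt => by
          have := hbelow (j+1) (by simpa using Nat.succ_lt_succ hj) (Nat.succ_lt_succ hlt)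
          simpa using this)
        (fun j hj hge hjh => by
          have := hmid (j+1) (by simpa using Nat.succ_lt_succ hj) (Nat.succ_le_succ hge) (Nat.succ_lt_succ hjh)
          simpa using this)
        (fun j hj hge => by
          have := habove (j+1) (by simpa using Nat.succ_lt_succ hj) (Nat.succ_le_succ hge)
          simpa using this)
      rw [this]
      congr 1
      omega

lemma pv_slice_eq_filter (srt : List (Int × (Int × Int))) (xlo xhi : Int)
    (hp : srt.Pairwise (fun a b => a.2.1 ≤ b.2.1)) (hle : xlo ≤ xhi) :
    PySem.List.slice srt (some ((PySem.List.bisectLeft (srt.map (fun p => p.2.1)) xlo : Nat) : Int))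
        (some ((PySem.List.bisectLeft (srt.map (fun p => p.2.1)) (xhi + 1) : Nat) : Int))
      = srt.filter (fun p => decide (xlo ≤ p.2.1) && decide (p.2.1 ≤ xhi)) := by
  set xs := srt.map (fun p => p.2.1) with hxs
  have hpx : xs.Pairwise (· ≤ ·) := List.Pairwise.map _ (fun _ _ h => h) hp
  obtain ⟨hlo_le, hlo_lt, hlo_ge⟩ := PySem.List.bisectLeft_spec xs xlo hpx
  obtain ⟨hhi_le, hhi_lt, hhi_ge⟩ := PySem.List.bisectLeft_spec xs (xhi + 1) hpx
  set lo := PySem.List.bisectLeft xs xlo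
  set hi := PySem.List.bisectLeft xs (xhi + 1)
  have hlen : xs.length = srt.length := by simp [hxs]
  have hlohi : lo ≤ hi := by
    by_contra hc
    have hc' : hi < lo := by omega
    have h1 := hlo_lt hi (by omega) hc'
    have h2 := hhi_ge hi (by omega) (le_refl hi)
    omega
  have hkey : ∀ (j : Nat) (hj : j < srt.length), srt[j].2.1 = xs[j]'(by omega) := by
    intro j hj; simp [hxs]
  rw [PySem.List.slice_natCast]
  exact Eq.symm <| pv_filter_interval_eq_drop_take (fun p => p.2.1) xlo xhi srt lo hi hlohi (by omega)
    (fun j hj hlt => by show srt[j].2.1 < xlo; rw [hkey j hj]; exact hlo_lt j (by omega) hlt)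
    (fun j hj hge hjh => by
      show xlo ≤ srt[j].2.1 ∧ srt[j].2.1 ≤ xhi
      rw [hkey j hj]
      exact ⟨hlo_ge j (by omega) hge, by have := hhi_lt j (by omega) hjh; omega⟩)
    (fun j hj hge => by show xhi < srt[j].2.1; rw [hkey j hj]; have := hhi_ge j (by omega) hge; omega)

lemma pv_fold_sum (ylo yhi : Int) :
    ∀ (l : List (Int × (Int × Int))) (t0 : Int),
    l.foldl (fun t p => if decide (ylo ≤ p.2.2) && decide (p.2.2 ≤ yhi) then t + p.1 else t) t0
      = t0 + ((l.filter (fun p => decide (ylo ≤ p.2.2) && decide (p.2.2 ≤ yhi))).map (fun p => p.1)).sum := by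
  intro l
  induction l with
  | nil => intro t0; simp
  | cons a t ih =>
    intro t0
    rw [List.foldl_cons, List.filter_cons]
    by_cases h : (decide (ylo ≤ a.2.2) && decide (a.2.2 ≤ yhi)) = true
    · rw [if_pos h, if_pos h, ih]; simp; ring
    · rw [if_neg h, if_neg h, ih]

lemma pv_step_eq (numbers : List (Int × (Int × Int))) (p1 p2 : Int × (Int × Int))
    (acc : List (List (Int × (Int × Int)))) :
    pvStepB numbers (PySem.List.sorted numbers (fun p => p.2.1) false)
        ((PySem.List.sorted numbers (fun p => p.2.1) false).map (fun p => p.2.1)) p1 acc p2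
      = pvStepA numbers acc (p1, p2) := by
  have hsp : (PySem.List.sorted numbers (fun p => p.2.1) false).Pairwise (fun a b => a.2.1 ≤ b.2.1) :=
    PySem.List.sorted_pairwise numbers (fun p => p.2.1)
  have hperm : (PySem.List.sorted numbers (fun p => p.2.1) false).Perm numbers :=
    PySem.List.sorted_perm numbers (fun p => p.2.1) false
  have hle : min p1.2.1 p2.2.1 - 39 ≤ max p1.2.1 p2.2.1 + 38 := by
    have := min_le_max (a := p1.2.1) (b := p2.2.1); omega
  simp only [pvStepA, pvStepB]
  rw [pv_slice_eq_filter _ _ _ hsp hle, pv_fold_sum, List.filter_filter, zero_add]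
  have h1 : ∀ l : List (Int × (Int × Int)), l.filter (fun a =>
        decide (min p1.2.2 p2.2.2 - 39 ≤ a.2.2) && decide (a.2.2 ≤ max p1.2.2 p2.2.2 + 38) &&
        (decide (min p1.2.1 p2.2.1 - 39 ≤ a.2.1) && decide (a.2.1 ≤ max p1.2.1 p2.2.1 + 38)))
      = l.filter (fun p =>
        decide (min (p1.2.1 - 39) (p2.2.1 - 39) ≤ p.2.1) && decide (p.2.1 ≤ max (p1.2.1 + 38) (p2.2.1 + 38)) &&
        decide (min (p1.2.2 - 39) (p2.2.2 - 39) ≤ p.2.2) && decide (p.2.2 ≤ max (p1.2.2 + 38) (p2.2.2 + 38))) := by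
    intro l; apply List.filter_congr; intro p _
    rw [Bool.eq_iff_iff]; simp only [Bool.and_eq_true, decide_eq_true_eq]; omega
  have h2 : numbers.filter (fun p =>
        decide (min p1.2.1 p2.2.1 - 39 ≤ p.2.1) && decide (p.2.1 ≤ max p1.2.1 p2.2.1 + 38) &&
        decide (min p1.2.2 p2.2.2 - 39 ≤ p.2.2) && decide (p.2.2 ≤ max p1.2.2 p2.2.2 + 38))
      = numbers.filter (fun p =>
        decide (min (p1.2.1 - 39) (p2.2.1 - 39) ≤ p.2.1) && decide (p.2.1 ≤ max (p1.2.1 + 38) (p2.2.1 + 38)) &&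
        decide (min (p1.2.2 - 39) (p2.2.2 - 39) ≤ p.2.2) && decide (p.2.2 ≤ max (p1.2.2 + 38) (p2.2.2 + 38))) := by
    apply List.filter_congr; intro p _
    rw [Bool.eq_iff_iff]; simp only [Bool.and_eq_true, decide_eq_true_eq]; omega
  have hsum : (((PySem.List.sorted numbers (fun p => p.2.1) false).filter (fun p =>
        decide (min (p1.2.1 - 39) (p2.2.1 - 39) ≤ p.2.1) && decide (p.2.1 ≤ max (p1.2.1 + 38) (p2.2.1 + 38)) &&
        decide (min (p1.2.2 - 39) (p2.2.2 - 39) ≤ p.2.2) && decide (p.2.2 ≤ max (p1.2.2 + 38) (p2.2.2 + 38)))).map (fun p => p.1)).sum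
      = ((numbers.filter (fun p =>
        decide (min (p1.2.1 - 39) (p2.2.1 - 39) ≤ p.2.1) && decide (p.2.1 ≤ max (p1.2.1 + 38) (p2.2.1 + 38)) &&
        decide (min (p1.2.2 - 39) (p2.2.2 - 39) ≤ p.2.2) && decide (p.2.2 ≤ max (p1.2.2 + 38) (p2.2.2 + 38)))).map (fun p => p.1)).sum :=
    List.Perm.sum_eq (List.Perm.map _ (List.Perm.filter _ hperm))
  rw [h1, h2, hsum]

lemma pv_go_eq (numbers : List (Int × (Int × Int))) :
    ∀ (l : List (Int × (Int × Int))) (acc : List (List (Int × (Int × Int)))),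
    pvGoB numbers (PySem.List.sorted numbers (fun p => p.2.1) false)
        ((PySem.List.sorted numbers (fun p => p.2.1) false).map (fun p => p.2.1)) l acc
      = (pvCombs2 l).foldl (pvStepA numbers) acc := by
  intro l
  induction l with
  | nil => intro acc; simp [pvGoB, pvCombs2]
  | cons p1 tail ih =>
    intro acc
    simp only [pvGoB, pvCombs2]
    rw [ih, List.foldl_append, List.foldl_map]
    congr 1
    have hstep : pvStepB numbers (PySem.List.sorted numbers (fun p => p.2.1) false)
        ((PySem.List.sorted numbers (fun p => p.2.1) false).map (fun p => p.2.1)) p1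
        = fun acc p2 => pvStepA numbers acc (p1, p2) :=
      funext fun a => funext fun b => pv_step_eq numbers p1 b a
    rw [hstep]

-- ===== VERDICT (by name: the statement is the Claim_ definition above) =====
theorem find_rectangle_combinations_spec : Claim_equal_find_rectangle_combinations := by
  intro numbers _
  unfold Spec_find_rectangle_combinations find_rectangle_combinations find_rectangle_combinations_alt
  exact (pv_go_eq numbers numbers []).symm
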